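-- pv_equiv track=rewrite | github.com/ValPumpkins/Python-Lab | knit/knit.py | knit_pattern
-- ===== SOURCE A (Python) =====
-- def knit_pattern(rows, stitches):
--     pattern = []
--
--     for i in range(rows):
--         if i % 2 == 0:
--             row = "|-" + " " * (stitches - 2) + "-|"
--         else:
--             row = "| " + " " * (stitches - 2) + " |"
--
--         pattern.append(row)
--
--     return "\n".join(pattern)
--
-- rows = 20  # nb de rangs
--
-- stitches = 50  # nb de mailles par rang
-- ===== SOURCE B (Python) =====
-- def knit_pattern(rows, stitches):
--     if rows <= 0:
--         return ""
--     mid = " " * (stitches - 2)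
--     even = "|-" + mid + "-|"
--     odd = "| " + mid + " |"
--     pairs, extra = divmod(rows, 2)
--     body = (even + "\n" + odd + "\n") * pairs
--     return body + even if extra else body[:-1]
-- ===== Notes on version B (the rewrite author's own statement) =====
-- stated objective: alternative
-- what changed: B has no per-row loop and no join: it computes the pair count with divmod, replicates a precomputed two-row block string that many times via string multiplication, and appends a final even row (odd rows) or trims the trailing newline (even rows).
import Mathlib
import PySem

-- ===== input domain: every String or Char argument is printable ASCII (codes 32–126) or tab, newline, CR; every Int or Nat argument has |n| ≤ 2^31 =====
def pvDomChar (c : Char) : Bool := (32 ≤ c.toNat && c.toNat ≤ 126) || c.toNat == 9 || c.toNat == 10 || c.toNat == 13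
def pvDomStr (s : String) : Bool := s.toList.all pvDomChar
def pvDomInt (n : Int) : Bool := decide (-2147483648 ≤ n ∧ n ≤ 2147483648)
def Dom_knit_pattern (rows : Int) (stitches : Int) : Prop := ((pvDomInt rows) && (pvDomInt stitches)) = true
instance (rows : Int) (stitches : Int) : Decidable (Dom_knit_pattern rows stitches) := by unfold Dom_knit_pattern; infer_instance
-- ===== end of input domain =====

-- B builds the output without a per-row loop or join: it replicates a two-row block string pairs=rows//2 times and appends a final even row or trims the trailing newline; objective: alternative.

-- "|-" + " "*(stitches-2) + "-|"  (as code points)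
def pvEvenRow (stitches : Int) : List Char :=
  "|-".toList ++ PySem.List.pyRepeat [' '] (stitches - 2) ++ "-|".toList
-- "| " + " "*(stitches-2) + " |"
def pvOddRow (stitches : Int) : List Char :=
  "| ".toList ++ PySem.List.pyRepeat [' '] (stitches - 2) ++ " |".toList

-- ===== PORT A =====
def knit_pattern (rows : Int) (stitches : Int) : String :=
  let pattern := (PySem.List.pyRange 0 rows 1).foldl
    (fun acc i => acc ++ [if PySem.Int.mod i 2 == 0 then pvEvenRow stitches else pvOddRow stitches]) []
  String.ofList (PySem.Chars.join ['\n'] pattern)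

-- ===== PORT B =====
def knit_pattern_alt (rows : Int) (stitches : Int) : String :=
  if rows ≤ 0 then "" else
  let mid := PySem.List.pyRepeat [' '] (stitches - 2)
  let even := "|-".toList ++ mid ++ "-|".toList
  let odd := "| ".toList ++ mid ++ " |".toList
  let pairs := PySem.Int.floordiv rows 2
  let extra := PySem.Int.mod rows 2
  let body := PySem.List.pyRepeat (even ++ '\n' :: (odd ++ ['\n'])) pairs
  if extra == 1 then String.ofList (body ++ even)
  else String.ofList (PySem.List.slice body none (some (-1)))

-- ===== PRECONDITION & SPEC =====
def Spec_knit_pattern (rows : Int) (stitches : Int) (out : String) : Prop := out = knit_pattern_alt rows stitches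
instance (rows : Int) (stitches : Int) (out : String) : Decidable (Spec_knit_pattern rows stitches out) := by unfold Spec_knit_pattern; infer_instance

-- ===== CLAIM (what is proved, stated in full; the proofs are below) =====
def Claim_equal_knit_pattern : Prop := ∀ (rows : Int) (stitches : Int), Dom_knit_pattern rows stitches → Spec_knit_pattern rows stitches (knit_pattern rows stitches)

-- ===== LEMMAS AND PROOFS =====

-- the alternating row list shifts by two rows at a time
theorem pv_range_map_two (e o : List Char) (n : Nat) :
    (List.range (n + 2)).map (fun k => if k % 2 = 0 then e else o) =
      e :: o :: (List.range n).map (fun k => if k % 2 = 0 then e else o) := by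
  rw [List.range_succ_eq_map, List.range_succ_eq_map]
  simp only [List.map_cons, List.map_map]
  refine congrArg₂ List.cons (by norm_num) (congrArg₂ List.cons (by norm_num) ?_)
  apply List.map_congr_left
  intro k _
  have h2 : (k + 1 + 1) % 2 = k % 2 := by omega
  simp [Function.comp, Nat.succ_eq_add_one, h2]

-- odd number of rows: join = p copies of the newline-terminated block, then a final even row
theorem pv_join_odd (e o : List Char) (p : Nat) :
    PySem.Chars.join ['\n'] ((List.range (2 * p + 1)).map (fun k => if k % 2 = 0 then e else o)) =
      (List.replicate p (e ++ '\n' :: (o ++ ['\n']))).flatten ++ e := by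
  induction p with
  | zero => simp [PySem.Chars.join_singleton, List.range_succ]
  | succ p ih =>
    have h : 2 * (p + 1) + 1 = (2 * p + 1) + 2 := by omega
    rw [h, pv_range_map_two]
    have hne : (List.range (2 * p + 1)).map (fun k => if k % 2 = 0 then e else o) ≠ [] := by
      simp [List.range_succ]
    obtain ⟨q, rest, hqr⟩ := List.exists_cons_of_ne_nil hne
    rw [hqr] at ih ⊢
    rw [PySem.Chars.join_cons_cons, PySem.Chars.join_cons_cons, ih]
    simp [List.replicate_succ]

-- even positive number of rows: join + final newline = p+1 copies of the newline-terminated block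
theorem pv_join_even (e o : List Char) (p : Nat) :
    PySem.Chars.join ['\n'] ((List.range (2 * p + 2)).map (fun k => if k % 2 = 0 then e else o)) ++ ['\n'] =
      (List.replicate (p + 1) (e ++ '\n' :: (o ++ ['\n']))).flatten := by
  induction p with
  | zero =>
    have : (2 : Nat) = 0 + 2 := rfl
    rw [show (2 * 0 + 2 : Nat) = 0 + 2 from rfl, pv_range_map_two]
    simp [PySem.Chars.join_cons_cons, PySem.Chars.join_singleton]
  | succ p ih =>
    have h : 2 * (p + 1) + 2 = (2 * p + 2) + 2 := by omega
    rw [h, pv_range_map_two]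
    have hne : (List.range (2 * p + 2)).map (fun k => if k % 2 = 0 then e else o) ≠ [] := by
      simp [show 2 * p + 2 = (2 * p + 1) + 1 from rfl, List.range_succ]
    obtain ⟨q, rest, hqr⟩ := List.exists_cons_of_ne_nil hne
    rw [hqr] at ih ⊢
    rw [PySem.Chars.join_cons_cons, PySem.Chars.join_cons_cons]
    rw [show List.replicate (p + 1 + 1) (e ++ '\n' :: (o ++ ['\n'])) =
      (e ++ '\n' :: (o ++ ['\n'])) :: List.replicate (p + 1) (e ++ '\n' :: (o ++ ['\n'])) from rfl]
    rw [List.flatten_cons, ← ih]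
    simp

-- ===== VERDICT (by name: the statement is the Claim_ definition above) =====
theorem knit_pattern_spec : Claim_equal_knit_pattern := by
  intro rows stitches _
  unfold Spec_knit_pattern knit_pattern knit_pattern_alt
  rw [PySem.List.foldl_append_singleton_eq_map, List.nil_append]
  by_cases hneg : rows ≤ 0
  · rw [PySem.List.pyRange_one_eq_nil hneg]
    simp [hneg, PySem.Chars.join]
    rfl
  · simp only [hneg, if_false]
    obtain ⟨n, hn⟩ : ∃ n : Nat, rows = (n : Int) := ⟨rows.toNat, by omega⟩
    subst hn
    have hpos : 0 < n := by omega
    rw [PySem.List.pyRange_one 0 (n : Int)]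
    simp only [zero_add, Int.sub_zero, Int.toNat_natCast, List.map_map]
    have hmap : ∀ k : Nat,
        (if PySem.Int.mod ((k : Int)) 2 == 0 then pvEvenRow stitches else pvOddRow stitches) =
        (if k % 2 = 0 then pvEvenRow stitches else pvOddRow stitches) := by
      intro k
      have hcast : PySem.Int.mod (k : Int) 2 = ((k % 2 : Nat) : Int) := by
        exact_mod_cast PySem.Int.mod_natCast k 2
      by_cases hpar : k % 2 = 0
      · simp only [hcast, hpar]
        simp
      · have h1 : k % 2 = 1 := by omega
        simp only [hcast, h1]
        simp
    have hmap2 : List.map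
        ((fun i => if PySem.Int.mod i 2 == 0 then pvEvenRow stitches else pvOddRow stitches)
          ∘ fun k : Nat => (k : Int)) (List.range n) =
        List.map (fun k => if k % 2 = 0 then pvEvenRow stitches else pvOddRow stitches)
          (List.range n) :=
      List.map_congr_left (fun k _ => hmap k)
    have hdiv : PySem.Int.floordiv (n : Int) 2 = ((n / 2 : Nat) : Int) := by
      exact_mod_cast PySem.Int.floordiv_natCast n 2
    have hmod : PySem.Int.mod (n : Int) 2 = ((n % 2 : Nat) : Int) := by
      exact_mod_cast PySem.Int.mod_natCast n 2
    rw [hmap2]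
    simp only [hdiv, hmod, PySem.List.pyRepeat, Int.toNat_natCast]
    by_cases hodd : n % 2 = 1
    · have hbeq : (((n % 2 : Nat) : Int)) == 1 := by simp [hodd]
      rw [if_pos hbeq]
      have hn2 : n = 2 * (n / 2) + 1 := by omega
      conv_lhs => rw [hn2]
      rw [pv_join_odd]
      simp [pvEvenRow, pvOddRow, PySem.List.pyRepeat]
    · have heven : n % 2 = 0 := by omega
      have hbeq : ¬ ((((n % 2 : Nat) : Int)) == 1) = true := by simp [heven]
      rw [if_neg hbeq, PySem.List.slice_to_neg_one]
      have hp : n / 2 - 1 + 1 = n / 2 := by omega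
      have hn2 : n = 2 * (n / 2 - 1) + 2 := by omega
      have hj := congrArg List.dropLast
        (pv_join_even (pvEvenRow stitches) (pvOddRow stitches) (n / 2 - 1))
      rw [List.dropLast_concat, hp] at hj
      conv_lhs => rw [hn2]
      rw [hj]
      simp [pvEvenRow, pvOddRow, PySem.List.pyRepeat]
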